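-- pv_equiv track=rewrite | github.com/harshrajbhar20/AI-Powered-STAAD.Pro-.std-Generator-Full-3D-PEB-Models-with-UR-Servi | staad_generator.py | get_member_range_str
-- ===== SOURCE A (Python) =====
-- from typing import Any, Dict, List, Optional, Tuple, Union
--
-- def get_member_range_str(member_list: List[int]) -> str:
--     """
--     Convert a list of member IDs to a STAAD range string.
--     FIX: Always outputs ascending ranges (e.g., "1 TO 5", never "5 TO 1").
--     Only includes consecutive ranges, individual members listed separately.
--     """
--     if not member_list:
--         return ""
--
--     sorted_m = sorted(set(member_list))
--     ranges: List[str] = []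
--     start = sorted_m[0]
--     end = sorted_m[0]
--
--     for m in sorted_m[1:]:
--         if m == end + 1:
--             end = m
--         else:
--             if start == end:
--                 ranges.append(str(start))
--             else:
--                 ranges.append(f"{start} TO {end}")
--             start = m
--             end = m
--
--     if start == end:
--         ranges.append(str(start))
--     else:
--         ranges.append(f"{start} TO {end}")
--
--     return " ".join(ranges)
-- ===== SOURCE B (Python) =====
-- def get_member_range_str(member_list):
--     """Index-keyed grouping: consecutive runs of sorted unique IDs share the
--     key v - index, so one grouping pass replaces the running start/end state."""
--     sorted_m = sorted(set(member_list))
--     groups = {}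
--     for idx, v in enumerate(sorted_m):
--         key = v - idx
--         groups[key] = groups.get(key, []) + [v]
--     pieces = []
--     for g in groups.values():
--         pieces.append(str(g[0]) if len(g) == 1 else f"{g[0]} TO {g[-1]}")
--     return " ".join(pieces)
-- ===== Notes on version B (the rewrite author's own statement) =====
-- stated objective: alternative
-- what changed: Replaces A's running start/end state machine over the sorted ids by an index-keyed grouping pass: consecutive runs are exactly the groups of equal key (value - enumerate index) collected into a dict, each group formatted from its first and last element.
import Mathlib
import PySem

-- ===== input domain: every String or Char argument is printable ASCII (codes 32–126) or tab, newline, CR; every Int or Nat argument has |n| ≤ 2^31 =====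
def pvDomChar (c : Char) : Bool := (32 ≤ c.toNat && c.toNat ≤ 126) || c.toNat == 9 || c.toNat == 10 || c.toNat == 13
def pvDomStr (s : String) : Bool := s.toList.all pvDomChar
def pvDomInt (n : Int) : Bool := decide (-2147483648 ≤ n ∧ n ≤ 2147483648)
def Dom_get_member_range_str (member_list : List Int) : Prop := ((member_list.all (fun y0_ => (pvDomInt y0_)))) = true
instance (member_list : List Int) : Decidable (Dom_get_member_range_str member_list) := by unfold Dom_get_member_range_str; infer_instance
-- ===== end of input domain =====

-- B replaces A's running start/end loop by an index-keyed grouping pass (key v - index); objective: alternative (not faster).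

-- ===== PORT A =====
def get_member_range_str (member_list : List Int) : String :=
  if member_list = [] then ""
  else
    let sorted_m := PySem.List.sorted (PySem.Set.ofList member_list) (fun x => x)
    let start := PySem.List.pyGetD sorted_m 0 0
    let st := (PySem.List.slice sorted_m (some 1)).foldl
      (fun (st : List String × Int × Int) m =>
        if m = st.2.2 + 1 then (st.1, st.2.1, m)
        else (st.1 ++ [if st.2.1 = st.2.2 then PySem.Int.toStr st.2.1
                       else PySem.Int.toStr st.2.1 ++ " TO " ++ PySem.Int.toStr st.2.2], m, m))
      ([], start, start)
    let ranges := st.1 ++ [if st.2.1 = st.2.2 then PySem.Int.toStr st.2.1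
                           else PySem.Int.toStr st.2.1 ++ " TO " ++ PySem.Int.toStr st.2.2]
    PySem.Str.join " " ranges

-- ===== PORT B =====
def get_member_range_str_alt (member_list : List Int) : String :=
  let sorted_m := PySem.List.sorted (PySem.Set.ofList member_list) (fun x => x)
  let groups := (PySem.List.enumerate sorted_m).foldl
    (fun (d : PySem.Dict Int (List Int)) p => d.modify (p.2 - p.1) [] (fun g => g ++ [p.2]))
    PySem.Dict.empty
  let pieces := groups.values.foldl
    (fun ps g => ps ++ [if PySem.List.len g = 1 then PySem.Int.toStr (PySem.List.pyGetD g 0 0)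
                        else PySem.Int.toStr (PySem.List.pyGetD g 0 0) ++ " TO " ++ PySem.Int.toStr (PySem.List.pyGetD g (-1) 0)])
    []
  PySem.Str.join " " pieces

-- ===== PRECONDITION & SPEC =====
def Spec_get_member_range_str (member_list : List Int) (out : String) : Prop := out = get_member_range_str_alt member_list
instance (member_list : List Int) (out : String) : Decidable (Spec_get_member_range_str member_list out) := by unfold Spec_get_member_range_str; infer_instance

-- ===== CLAIM (what is proved, stated in full; the proofs are below) =====
def Claim_equal_get_member_range_str : Prop := ∀ (member_list : List Int), Dom_get_member_range_str member_list → Spec_get_member_range_str member_list (get_member_range_str member_list)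

-- ===== LEMMAS AND PROOFS =====

-- formatting helpers (proof-side names for the inline f-string expressions of both ports)
def pvFmt (s e : Int) : String :=
  if s = e then PySem.Int.toStr s else PySem.Int.toStr s ++ " TO " ++ PySem.Int.toStr e

def pvFmtG (g : List Int) : String :=
  if PySem.List.len g = 1 then PySem.Int.toStr (PySem.List.pyGetD g 0 0)
  else PySem.Int.toStr (PySem.List.pyGetD g 0 0) ++ " TO " ++ PySem.Int.toStr (PySem.List.pyGetD g (-1) 0)

-- maximal consecutive-run decomposition (common reference shape for both proofs)
def pvRun (p : Int) : List Int → List Int × List Int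
  | [] => ([], [])
  | y :: ys => if y = p + 1 then (y :: (pvRun y ys).1, (pvRun y ys).2) else ([], y :: ys)

theorem pvRun_snd_length_le (l : List Int) : ∀ p : Int, (pvRun p l).2.length ≤ l.length := by
  induction l with
  | nil => intro p; simp [pvRun]
  | cons y ys ih =>
    intro p
    by_cases h : y = p + 1
    · simpa [pvRun, h] using Nat.le_succ_of_le (ih y)
    · simp [pvRun, h]

def pvRuns : List Int → List (List Int)
  | [] => []
  | x :: t => (x :: (pvRun x t).1) :: pvRuns (pvRun x t).2
termination_by l => l.length
decreasing_by
  exact Nat.lt_succ_of_le (pvRun_snd_length_le t x)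

-- A's loop, accumulator removed
def pvLoopA (s e : Int) : List Int → List String
  | [] => [pvFmt s e]
  | m :: ms => if m = e + 1 then pvLoopA s m ms else pvFmt s e :: pvLoopA m m ms

theorem pvRun_decomp (l : List Int) : ∀ p : Int, (pvRun p l).1 ++ (pvRun p l).2 = l := by
  induction l with
  | nil => intro p; simp [pvRun]
  | cons y ys ih =>
    intro p
    by_cases h : y = p + 1
    · simpa [pvRun, h] using ih y
    · simp [pvRun, h]

theorem pvRun_last (l : List Int) : ∀ p : Int,
    (p :: (pvRun p l).1).getLast? = some (p + (pvRun p l).1.length) := by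
  induction l with
  | nil => intro p; simp [pvRun]
  | cons y ys ih =>
    intro p
    by_cases h : y = p + 1
    · have hy := ih y
      simp only [pvRun, if_pos h]
      rcases hr : (pvRun y ys).1 with _ | ⟨a, r⟩
      · simp only [hr] at hy ⊢
        simp at hy ⊢
        omega
      · rw [hr] at hy
        simp only [List.getLast?_cons_cons] at hy ⊢
        rw [hy]
        congr 1
        simp only [List.length_cons]
        push_cast
        omega
    · simp only [pvRun, if_neg h]
      simp

theorem pvFmtG_run (l : List Int) (p : Int) :
    pvFmtG (p :: (pvRun p l).1) = pvFmt p (p + (pvRun p l).1.length) := by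
  rcases hr : (pvRun p l).1 with _ | ⟨a, r⟩
  · simp [pvFmtG, pvFmt, PySem.List.len_eq, PySem.List.pyGetD_zero_cons]
  · have hlast := pvRun_last l p
    rw [hr] at hlast
    have hne : (p :: a :: r) ≠ [] := by simp
    have hgl : (p :: a :: r).getLast hne = p + ((a :: r).length : Int) := by
      have h2 := List.getLast?_eq_some_getLast hne
      rw [h2] at hlast
      exact Option.some.inj hlast
    unfold pvFmtG pvFmt
    rw [PySem.List.pyGetD_neg_one _ _ hne, hgl, PySem.List.pyGetD_zero_cons]
    rw [if_neg (by simp [PySem.List.len_eq]; omega), if_neg (by simp; omega)]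

-- A's step function (syntactically A's fold lambda)
def pvStepA (st : List String × Int × Int) (m : Int) : List String × Int × Int :=
  if m = st.2.2 + 1 then (st.1, st.2.1, m)
  else (st.1 ++ [if st.2.1 = st.2.2 then PySem.Int.toStr st.2.1
                 else PySem.Int.toStr st.2.1 ++ " TO " ++ PySem.Int.toStr st.2.2], m, m)

-- A's accumulator fold = pvLoopA
theorem pvA_fold (l : List Int) : ∀ (ranges : List String) (s e : Int),
    (l.foldl pvStepA (ranges, s, e)).1
      ++ [pvFmt (l.foldl pvStepA (ranges, s, e)).2.1 (l.foldl pvStepA (ranges, s, e)).2.2]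
    = ranges ++ pvLoopA s e l := by
  induction l with
  | nil => intro ranges s e; simp [pvLoopA]
  | cons m ms ih =>
    intro ranges s e
    simp only [List.foldl_cons]
    by_cases h : m = e + 1
    · have : pvStepA (ranges, s, e) m = (ranges, s, m) := by simp [pvStepA, h]
      rw [this, ih, pvLoopA, if_pos h]
    · have : pvStepA (ranges, s, e) m = (ranges ++ [pvFmt s e], m, m) := by
        simp [pvStepA, h, pvFmt]
      rw [this, ih, pvLoopA, if_neg h]
      simp

-- pvLoopA = run decomposition, mapped through the formatter
theorem pvLoopA_runs (l : List Int) : ∀ s e : Int,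
    pvLoopA s e l = pvFmt s (e + (pvRun e l).1.length) :: (pvRuns (pvRun e l).2).map pvFmtG := by
  induction l with
  | nil => intro s e; simp [pvLoopA, pvRun, pvRuns]
  | cons m ms ih =>
    intro s e
    by_cases h : m = e + 1
    · simp only [pvLoopA, if_pos h, pvRun, ih]
      congr 2
      · simp only [List.length_cons]
        push_cast
        omega
    · simp only [pvLoopA, if_neg h, pvRun, ih]
      rw [pvRuns]
      simp only [List.map_cons, List.length_nil]
      congr 2
      · omega
      · exact (pvFmtG_run ms m).symm

-- ===== B side =====
def pvL (xs : List Int) (i : Int) : List (Int × Int) :=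
  (PySem.List.enumerate xs i).map (fun p => (p.2 - p.1, p.2))

-- run keys are constant
theorem pvRunKeys (l : List Int) : ∀ (p i : Int),
    pvL (pvRun p l).1 (i + 1) = (pvRun p l).1.map (fun v => (p - i, v)) := by
  induction l with
  | nil => intro p i; simp [pvRun, pvL]
  | cons y ys ih =>
    intro p i
    by_cases h : y = p + 1
    · simp only [pvRun, if_pos h]
      simp only [pvL, PySem.List.enumerate_cons, List.map_cons]
      have := ih y (i + 1)
      simp only [pvL] at this
      rw [this]
      have hk : y - (i + 1) = p - i := by omega
      rw [hk]
    · simp [pvRun, h, pvL]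

-- keys of a strictly increasing tail are strictly above c
theorem pvKeyLB (l : List Int) : ∀ (i c : Int), l.Pairwise (· < ·) →
    (∀ y ∈ l, c + i < y) → ∀ q ∈ pvL l i, c < q.1 := by
  induction l with
  | nil => intro i c _ _ q hq; simp [pvL, PySem.List.enumerate] at hq
  | cons y ys ih =>
    intro i c hp hb q hq
    simp only [pvL, PySem.List.enumerate_cons, List.map_cons, List.mem_cons] at hq
    rcases hq with hq | hq
    · subst hq
      have := hb y (by simp)
      simp only
      omega
    · have hy : c + i < y := hb y (by simp)
      refine ih (i + 1) c (List.Pairwise.of_cons hp) ?_ q hq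
      intro z hz
      have : y < z := (List.pairwise_cons.mp hp).1 z hz
      omega

-- the remainder after a maximal run starts at least two above the run's end
theorem pvRestLB (l : List Int) : ∀ p : Int, l.Pairwise (· < ·) →
    (∀ y ∈ l, p < y) → ∀ y ∈ (pvRun p l).2, p + (pvRun p l).1.length + 1 < y := by
  induction l with
  | nil => intro p _ _ y hy; simp [pvRun] at hy
  | cons y0 ys ih =>
    intro p hp hb y hy
    by_cases h : y0 = p + 1
    · simp only [pvRun, if_pos h] at hy ⊢
      have := ih y0 (List.Pairwise.of_cons hp) (fun z hz => (List.pairwise_cons.mp hp).1 z hz) y hy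
      simp only [List.length_cons]
      push_cast
      omega
    · simp only [pvRun, if_neg h] at hy ⊢
      have h0 : p < y0 := hb y0 (by simp)
      simp only [List.length_nil] at *
      rcases List.mem_cons.mp hy with rfl | hy2
      · push_cast; omega
      · have : y0 < y := (List.pairwise_cons.mp hp).1 y hy2
        push_cast; omega

theorem pvFoldlAdd_mem (l1 : List Int) : ∀ (s : List Int) (c : Int),
    (∀ a ∈ l1, a = c) → c ∈ s → List.foldl PySem.Set.add s l1 = s := by
  induction l1 with
  | nil => intro s c _ _; rfl
  | cons a l ih =>
    intro s c h1 hc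
    have ha : a = c := h1 a (by simp)
    subst ha
    have : PySem.Set.add s a = s := by
      simp [PySem.Set.add, PySem.Set.contains, hc]
    simp only [List.foldl_cons, this]
    exact ih s a (fun b hb => h1 b (by simp [hb])) hc

theorem pvFoldlAdd_cons (l2 : List Int) : ∀ (c : Int) (s : List Int), c ∉ l2 →
    List.foldl PySem.Set.add (c :: s) l2 = c :: List.foldl PySem.Set.add s l2 := by
  induction l2 with
  | nil => intro c s _; rfl
  | cons y ys ih =>
    intro c s hc
    have hyc : y ≠ c := fun h => hc (by simp [h])
    have hadd : PySem.Set.add (c :: s) y = c :: PySem.Set.add s y := by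
      by_cases hm : y ∈ s
      · simp [PySem.Set.add, PySem.Set.contains, hm, hyc]
      · simp [PySem.Set.add, PySem.Set.contains, hm, hyc]
    simp only [List.foldl_cons, hadd]
    exact ih c _ (fun h => hc (List.mem_cons_of_mem _ h))

theorem pvOfList_block (l1 l2 : List Int) (c : Int)
    (h1 : ∀ a ∈ l1, a = c) (h2 : c ∉ l2) :
    PySem.Set.ofList (c :: (l1 ++ l2)) = c :: PySem.Set.ofList l2 := by
  have h0 : PySem.Set.ofList (c :: (l1 ++ l2)) = List.foldl PySem.Set.add [] (c :: (l1 ++ l2)) := by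
    rw [PySem.Set.ofList_eq_foldl]
  rw [h0]
  simp only [List.foldl_cons, List.foldl_append]
  have hadd0 : PySem.Set.add [] c = [c] := by rfl
  rw [hadd0, pvFoldlAdd_mem l1 [c] c h1 (by simp), pvFoldlAdd_cons l2 c [] h2]
  rw [PySem.Set.ofList_eq_foldl]

-- core B lemma: grouping by (value - index) over a strictly increasing list = run decomposition
theorem pvGroup_runs : ∀ (n : Nat) (xs : List Int) (i : Int), xs.length ≤ n →
    xs.Pairwise (· < ·) →
    (PySem.Set.ofList ((pvL xs i).map (·.1))).map
      (fun k => ((pvL xs i).filter (fun q => q.1 == k)).map (·.2)) = pvRuns xs := by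
  intro n
  induction n with
  | zero =>
    intro xs i hlen _
    have hx : xs = [] := List.length_eq_zero_iff.mp (Nat.le_zero.mp hlen)
    subst hx
    simp [pvL, PySem.List.enumerate, pvRuns, PySem.Set.ofList]
  | succ n ih =>
    intro xs i hlen hp
    cases xs with
    | nil => simp [pvL, PySem.List.enumerate, pvRuns, PySem.Set.ofList]
    | cons x t =>
      have hpt : t.Pairwise (· < ·) := (List.pairwise_cons.mp hp).2
      have hbt : ∀ y ∈ t, x < y := (List.pairwise_cons.mp hp).1
      have hdec := pvRun_decomp t x
      have hrestlb := pvRestLB t x hpt hbt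
      have hkeys := pvRunKeys t x i
      have hlen2 := pvRun_snd_length_le t x
      rcases hrr : pvRun x t with ⟨r, rest⟩
      rw [hrr] at hdec hrestlb hkeys hlen2
      dsimp only at hdec hrestlb hkeys hlen2
      have hprest : rest.Pairwise (· < ·) := by
        rw [← hdec] at hpt
        exact (List.pairwise_append.mp hpt).2.1
      have hL : pvL (x :: t) i
          = (x - i, x) :: (r.map (fun v => (x - i, v)) ++ pvL rest (i + 1 + (r.length : Int))) := by
        have htmp : PySem.List.enumerate t (i + 1)
            = PySem.List.enumerate r (i + 1) ++ PySem.List.enumerate rest (i + 1 + (r.length : Int)) := by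
          rw [← hdec, PySem.List.enumerate_append]
        have hkeys' := hkeys
        simp only [pvL] at hkeys' ⊢
        rw [PySem.List.enumerate_cons, htmp, List.map_cons, List.map_append, hkeys']
      have hkeysrest : ∀ q ∈ pvL rest (i + 1 + (r.length : Int)), x - i < q.1 := by
        apply pvKeyLB _ _ _ hprest
        intro y hy
        have := hrestlb y hy
        omega
      have hks : (pvL (x :: t) i).map (·.1)
          = (x - i) :: (r.map (fun _ => x - i) ++ (pvL rest (i + 1 + (r.length : Int))).map (·.1)) := by
        rw [hL]
        simp [List.map_map, Function.comp_def]
      have hof : PySem.Set.ofList ((pvL (x :: t) i).map (·.1))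
          = (x - i) :: PySem.Set.ofList ((pvL rest (i + 1 + (r.length : Int))).map (·.1)) := by
        rw [hks]
        apply pvOfList_block
        · intro a ha
          obtain ⟨v, hv, ha2⟩ := List.mem_map.mp ha
          omega
        · intro hmem
          simp only [List.mem_map] at hmem
          obtain ⟨q, hq, hq1⟩ := hmem
          have := hkeysrest q hq
          omega
      rw [hof, List.map_cons, pvRuns, hrr]
      congr 1
      · rw [hL]
        simp only [List.filter_cons, List.filter_append]
        have hcc : ((x - i : Int) == (x - i)) = true := by simp
        simp only [hcc]
        have hfr : (r.map (fun v => (x - i, v))).filter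
            (fun q => q.1 == (x - i)) = r.map (fun v => (x - i, v)) := by
          apply List.filter_eq_self.mpr
          intro q hq
          simp only [List.mem_map] at hq
          obtain ⟨v, _, rfl⟩ := hq
          simp
        have hfrest : (pvL rest (i + 1 + (r.length : Int))).filter
            (fun q => q.1 == (x - i)) = [] := by
          apply List.filter_eq_nil_iff.mpr
          intro q hq
          have := hkeysrest q hq
          simp only [beq_iff_eq]
          omega
        rw [hfr, hfrest]
        simp [List.map_map, Function.comp_def]
      · have hcong : ∀ k ∈ PySem.Set.ofList ((pvL rest (i + 1 + (r.length : Int))).map (·.1)),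
            ((pvL (x :: t) i).filter (fun q => q.1 == k)).map (·.2)
              = ((pvL rest (i + 1 + (r.length : Int))).filter (fun q => q.1 == k)).map (·.2) := by
          intro k hk
          have hkgt : x - i < k := by
            have hk2 := (PySem.Set.mem_ofList _ _).mp hk
            simp only [List.mem_map] at hk2
            obtain ⟨q, hq, hq1⟩ := hk2
            have := hkeysrest q hq
            omega
          rw [hL]
          simp only [List.filter_cons, List.filter_append]
          have h1 : (((x - i, x) : Int × Int).1 == k) = false := by
            simp only [beq_eq_false_iff_ne, ne_eq]
            omega
          have h2 : (r.map (fun v => (x - i, v))).filter (fun q => q.1 == k) = [] := by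
            apply List.filter_eq_nil_iff.mpr
            intro q hq
            simp only [List.mem_map] at hq
            obtain ⟨v, _, rfl⟩ := hq
            simp only [beq_iff_eq]
            omega
          rw [h2]
          simp [h1]
        rw [List.map_congr_left hcong]
        apply ih
        · simp only [List.length_cons] at hlen
          omega
        · exact hprest

theorem pvA_eq (ml : List Int) (hml : ml ≠ []) :
    get_member_range_str ml
      = PySem.Str.join " " ((pvRuns (PySem.List.sorted (PySem.Set.ofList ml) (fun x => x))).map pvFmtG) := by
  unfold get_member_range_str
  rw [if_neg hml]
  have hxne : PySem.List.sorted (PySem.Set.ofList ml) (fun x => x) ≠ [] := by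
    intro h
    exact hml ((PySem.List.sorted_eq_nil_iff _ _ _).mp h |> fun h2 => by
      rcases ml with _ | ⟨a, ml'⟩
      · rfl
      · exact absurd (h2 ▸ (PySem.Set.mem_ofList (a :: ml') a).mpr (by simp)) (by simp))
  obtain ⟨x, t, hxt⟩ := List.exists_cons_of_ne_nil hxne
  rw [hxt]
  show PySem.Str.join " "
      ((List.foldl pvStepA ([], PySem.List.pyGetD (x :: t) 0 0, PySem.List.pyGetD (x :: t) 0 0)
          (PySem.List.slice (x :: t) (some 1))).1
        ++ [pvFmt (List.foldl pvStepA ([], PySem.List.pyGetD (x :: t) 0 0, PySem.List.pyGetD (x :: t) 0 0)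
              (PySem.List.slice (x :: t) (some 1))).2.1
            (List.foldl pvStepA ([], PySem.List.pyGetD (x :: t) 0 0, PySem.List.pyGetD (x :: t) 0 0)
              (PySem.List.slice (x :: t) (some 1))).2.2]) = _
  have h0 : PySem.List.pyGetD (x :: t) 0 0 = x := PySem.List.pyGetD_zero_cons x t 0
  have h1 : PySem.List.slice (x :: t) (some 1) = t := by
    rw [PySem.List.slice_from (x :: t) (by omega : (0 : Int) ≤ 1)]
    rfl
  rw [h0, h1, pvA_fold t [] x x, List.nil_append, pvLoopA_runs, pvRuns]
  rw [List.map_cons, pvFmtG_run]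

theorem pvB_eq (ml : List Int) :
    get_member_range_str_alt ml
      = PySem.Str.join " " ((pvRuns (PySem.List.sorted (PySem.Set.ofList ml) (fun x => x))).map pvFmtG) := by
  unfold get_member_range_str_alt
  dsimp only
  have hxp := PySem.List.sorted_ofList_pairwise_lt ml
  congr 1
  show List.foldl (fun (ps : List String) g => ps ++ [pvFmtG g]) []
      ((List.foldl (fun (d : PySem.Dict Int (List Int)) p => d.modify (p.2 - p.1) [] fun g => g ++ [p.2])
          PySem.Dict.empty
          (PySem.List.enumerate (PySem.List.sorted (PySem.Set.ofList ml) fun x => x))).values)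
    = List.map pvFmtG (pvRuns (PySem.List.sorted (PySem.Set.ofList ml) fun x => x))
  rw [PySem.List.foldl_append_singleton_eq_map pvFmtG _ [], List.nil_append]
  congr 1
  -- groups.values = pvRuns xs
  have hfold : (PySem.List.enumerate (PySem.List.sorted (PySem.Set.ofList ml) (fun x => x))).foldl
      (fun (d : PySem.Dict Int (List Int)) p => d.modify (p.2 - p.1) [] (fun g => g ++ [p.2]))
      PySem.Dict.empty
      = (pvL (PySem.List.sorted (PySem.Set.ofList ml) (fun x => x)) 0).foldl
          (fun (d : PySem.Dict Int (List Int)) q => d.modify q.1 [] (fun g => g ++ [q.2]))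
          PySem.Dict.empty := by
    rw [pvL, List.foldl_map]
  rw [hfold]
  have hkeys : ((pvL (PySem.List.sorted (PySem.Set.ofList ml) (fun x => x)) 0).foldl
      (fun (d : PySem.Dict Int (List Int)) q => d.modify q.1 [] (fun g => g ++ [q.2]))
      PySem.Dict.empty).keys
      = PySem.Set.ofList ((pvL (PySem.List.sorted (PySem.Set.ofList ml) (fun x => x)) 0).map (·.1)) := by
    rw [PySem.Dict.keys_foldl_modify_key (l := pvL (PySem.List.sorted (PySem.Set.ofList ml) (fun x => x)) 0)
        (key := fun (q : Int × Int) => q.1) (d0 := ([] : List Int))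
        (f := fun _ (q : Int × Int) => (fun g => g ++ [q.2])) (d := PySem.Dict.empty)]
    simp [PySem.Set.update, PySem.Set.ofList_eq_foldl]
  have hnd : ((pvL (PySem.List.sorted (PySem.Set.ofList ml) (fun x => x)) 0).foldl
      (fun (d : PySem.Dict Int (List Int)) q => d.modify q.1 [] (fun g => g ++ [q.2]))
      PySem.Dict.empty).keys.Nodup := by
    apply PySem.Dict.nodup_keys_foldl_modify_key (l := pvL (PySem.List.sorted (PySem.Set.ofList ml) (fun x => x)) 0)
        (key := fun (q : Int × Int) => q.1) (d0 := ([] : List Int))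
        (f := fun _ (q : Int × Int) => (fun g => g ++ [q.2])) (d := PySem.Dict.empty)
    simp
  rw [PySem.Dict.values_eq_map_keys _ hnd [], hkeys]
  have hget : ∀ k, ((pvL (PySem.List.sorted (PySem.Set.ofList ml) (fun x => x)) 0).foldl
      (fun (d : PySem.Dict Int (List Int)) q => d.modify q.1 [] (fun g => g ++ [q.2]))
      PySem.Dict.empty).getD k []
      = ((pvL (PySem.List.sorted (PySem.Set.ofList ml) (fun x => x)) 0).filter
          (fun q => q.1 == k)).map (·.2) := by
    intro k
    rw [PySem.Dict.getD_foldl_modify_append]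
    simp
  rw [List.map_congr_left (fun k _ => hget k)]
  exact pvGroup_runs (PySem.List.sorted (PySem.Set.ofList ml) (fun x => x)).length _ 0 (Nat.le_refl _) hxp

-- ===== VERDICT (by name: the statement is the Claim_ definition above) =====
theorem get_member_range_str_spec : Claim_equal_get_member_range_str := by
  intro ml _
  unfold Spec_get_member_range_str
  by_cases hml : ml = []
  · subst hml
    rw [pvB_eq]
    rw [show PySem.List.sorted (PySem.Set.ofList ([] : List Int)) (fun x => x) = [] from rfl]
    rw [show pvRuns [] = [] from by rw [pvRuns]]
    rfl
  · rw [pvA_eq ml hml, pvB_eq ml]
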